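-- pv_equiv track=rewrite | github.com/AnkitVeerhub/DSA | MY DSA Practice Set/PYTHON/Leetcode/ahguk.py | findCoins
-- ===== SOURCE A (Python) =====
-- from typing import List
--
-- def findCoins(numWays: List[int]) -> List[int]:
--     n = len(numWays)
--     dp = [0] * (n + 1)
--     dp[0] = 1  # base case: one way to make amount 0
--     result = []
--
--     for coin in range(1, n + 1):
--         new_dp = dp[:]  # clone current dp state
--
--         # Simulate adding coin to dp table
--         for i in range(coin, n + 1):
--             new_dp[i] += dp[i - coin]
--
--         # Check if new_dp[i] ever exceeds numWays[i-1]
--         exceeds = any(new_dp[i] > numWays[i - 1] for i in range(1, n + 1))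
--         if not exceeds:
--             result.append(coin)
--             dp = new_dp  # accept this coin
--
--     # Final validation: does dp match numWays exactly?
--     for i in range(1, n + 1):
--         if dp[i] != numWays[i - 1]:
--             return []
--
--     return result
-- ===== SOURCE B (Python) =====
-- from typing import List
--
-- def findCoins(numWays: List[int]) -> List[int]:
--     # Single in-place dp pass: discover coin i by comparing dp[i] with the target,
--     # apply its 0/1 contribution with a backward sweep (no cloning), and bail out
--     # with an empty result at the first amount whose way-count cannot be met exactly.
--     n = len(numWays)
--     dp = [0] * (n + 1)
--     dp[0] = 1
--     result = []
--     for i in range(1, n + 1):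
--         if dp[i] < numWays[i - 1]:
--             result.append(i)
--             for j in range(n, i - 1, -1):
--                 dp[j] += dp[j - i]
--         if dp[i] != numWays[i - 1]:
--             return []
--     return result
-- ===== Notes on version B (the rewrite author's own statement) =====
-- stated objective: faster
-- what changed: One in-place dp maintained across the pass with a backward 0/1 update, coin discovery by a single per-amount comparison and an early empty-result exit at the first mismatch, replacing A's per-coin dp clone, full re-simulation, full exceeds rescan and separate final validation loop.
import Mathlib
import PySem

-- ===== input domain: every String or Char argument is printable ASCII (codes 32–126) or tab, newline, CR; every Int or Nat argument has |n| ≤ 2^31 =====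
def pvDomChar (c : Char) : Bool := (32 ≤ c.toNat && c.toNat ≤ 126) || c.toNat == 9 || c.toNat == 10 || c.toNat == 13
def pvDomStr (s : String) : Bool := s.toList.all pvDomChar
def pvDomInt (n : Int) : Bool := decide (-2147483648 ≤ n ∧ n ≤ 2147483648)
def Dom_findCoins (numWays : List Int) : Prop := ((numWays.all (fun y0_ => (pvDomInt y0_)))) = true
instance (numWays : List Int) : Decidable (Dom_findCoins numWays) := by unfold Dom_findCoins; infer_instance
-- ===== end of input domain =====

-- B replaces A's per-coin dp clone + full exceeds rescan + final validation loop by one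
-- in-place dp pass with a backward 0/1 update, a single per-amount comparison and an early exit.
-- All list indices in both programs are provably nonnegative and in range, so `List.getD i 0`
-- and `List.set` are exact ports of Python's `xs[i]` / `xs[i] = v` here.

-- ===== PORT A =====
-- new_dp = dp[:] ; for i in range(coin, n+1): new_dp[i] += dp[i-coin]
def pvA_sim (dp : List Int) (coin n : Nat) : List Int :=
  (List.range' coin (n + 1 - coin)).foldl
    (fun nd i => nd.set i (nd.getD i 0 + dp.getD (i - coin) 0)) dp

-- for coin in range(1, n+1): …  carrying (dp, result)
def pvA_loop (w : List Int) (n coin : Nat) (dp res : List Int) : List Int × List Int :=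
  if coin ≤ n then
    let nd := pvA_sim dp coin n
    let exceeds := (List.range' 1 n).any (fun i => decide (nd.getD i 0 > w.getD (i - 1) 0))
    if exceeds then pvA_loop w n (coin + 1) dp res
    else pvA_loop w n (coin + 1) nd (res ++ [(coin : Int)])
  else (dp, res)
termination_by n + 1 - coin

def findCoins (numWays : List Int) : List Int :=
  let n := numWays.length
  let r := pvA_loop numWays n 1 ((List.replicate (n + 1) (0 : Int)).set 0 1) []
  -- for i in range(1, n+1): if dp[i] != numWays[i-1]: return []  /  return result
  if (List.range' 1 n).all (fun i => decide (r.1.getD i 0 = numWays.getD (i - 1) 0)) then r.2 else []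

-- ===== PORT B =====
-- for j in range(n, i-1, -1): dp[j] += dp[j-i]
def pvB_upd (dp : List Int) (c n : Nat) : List Int :=
  (List.range' c (n + 1 - c)).reverse.foldl
    (fun d j => d.set j (d.getD j 0 + d.getD (j - c) 0)) dp

-- for i in range(1, n+1): …  with the early `return []`
def pvB_loop (w : List Int) (n i : Nat) (dp res : List Int) : List Int :=
  if i ≤ n then
    let s := if dp.getD i 0 < w.getD (i - 1) 0
             then (pvB_upd dp i n, res ++ [(i : Int)]) else (dp, res)
    if s.1.getD i 0 ≠ w.getD (i - 1) 0 then []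
    else pvB_loop w n (i + 1) s.1 s.2
  else res
termination_by n + 1 - i

def findCoins_alt (numWays : List Int) : List Int :=
  let n := numWays.length
  pvB_loop numWays n 1 ((List.replicate (n + 1) (0 : Int)).set 0 1) []

-- ===== PRECONDITION & SPEC =====
def Spec_findCoins (numWays : List Int) (out : List Int) : Prop := out = findCoins_alt numWays
instance (numWays : List Int) (out : List Int) : Decidable (Spec_findCoins numWays out) := by unfold Spec_findCoins; infer_instance

-- ===== CLAIM (what is proved, stated in full; the proofs are below) =====
def Claim_equal_findCoins : Prop := ∀ (numWays : List Int), Dom_findCoins numWays → Spec_findCoins numWays (findCoins numWays)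

-- ===== LEMMAS AND PROOFS =====

-- A's tail (remaining loop plus the final validation), as one value
def pvAout (w : List Int) (n c : Nat) (dp res : List Int) : List Int :=
  let r := pvA_loop w n c dp res
  if (List.range' 1 n).all (fun i => decide (r.1.getD i 0 = w.getD (i - 1) 0)) then r.2 else []

lemma pvGetD_set (l : List Int) (i j : Nat) (a : Int) :
    (l.set i a).getD j 0 = if i = j ∧ i < l.length then a else l.getD j 0 := by
  simp only [List.getD_eq_getElem?_getD, List.getElem?_set]
  split_ifs with h1 h2 h3 h4 <;> simp_all <;> omega

lemma pvFoldl_set_len (g : List Int → Nat → Int) :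
    ∀ (l : List Nat) (dp : List Int),
      (l.foldl (fun d i => d.set i (g d i)) dp).length = dp.length := by
  intro l
  induction l with
  | nil => intro dp; rfl
  | cons a t ih => intro dp; simp only [List.foldl_cons]; rw [ih]; simp

lemma pvSimAux (dp : List Int) (c : Nat) :
    ∀ (k a : Nat) (acc : List Int), acc.length = dp.length → a + k ≤ dp.length →
      ∀ i, ((List.range' a k).foldl (fun nd i => nd.set i (nd.getD i 0 + dp.getD (i - c) 0)) acc).getD i 0
        = acc.getD i 0 + (if a ≤ i ∧ i < a + k then dp.getD (i - c) 0 else 0) := by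
  intro k
  induction k with
  | zero =>
    intro a acc _ _ i
    simp only [List.range'_zero, List.foldl_nil]
    rw [if_neg (by omega)]; ring
  | succ k ih =>
    intro a acc hlen hb i
    rw [List.range'_succ, List.foldl_cons]
    rw [ih (a+1) _ (by rw [List.length_set]; exact hlen) (by omega) i]
    rw [pvGetD_set]
    by_cases hia : a = i
    · subst hia
      rw [if_pos ⟨rfl, by omega⟩, if_neg (by omega), if_pos (by omega)]
      ring
    · rw [if_neg (by exact fun h => hia h.1)]
      by_cases h2 : a + 1 ≤ i ∧ i < a + 1 + k
      · rw [if_pos h2, if_pos (by omega)]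
      · rw [if_neg h2, if_neg (by omega)]

lemma pvSimBAux (c : Nat) :
    ∀ (k a : Nat) (dp : List Int), a + k ≤ dp.length →
      ∀ i, ((List.range' a k).reverse.foldl (fun d j => d.set j (d.getD j 0 + d.getD (j - c) 0)) dp).getD i 0
        = dp.getD i 0 + (if a ≤ i ∧ i < a + k then dp.getD (i - c) 0 else 0) := by
  intro k
  induction k with
  | zero =>
    intro a dp _ i
    simp only [List.range'_zero, List.reverse_nil, List.foldl_nil]
    rw [if_neg (by omega)]; ring
  | succ k ih =>
    intro a dp hb i
    rw [List.range'_concat, List.reverse_append, List.reverse_singleton, List.singleton_append,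
        List.foldl_cons]
    set dp1 := dp.set (a + 1 * k) (dp.getD (a + 1 * k) 0 + dp.getD (a + 1 * k - c) 0) with hdp1
    rw [ih a dp1 (by rw [hdp1, List.length_set]; omega) i]
    rw [hdp1, pvGetD_set]
    by_cases hia : a + 1 * k = i
    · rw [if_pos ⟨hia, by omega⟩, if_neg (by omega), if_pos (by omega)]
      rw [hia]; simp
    · rw [if_neg (by exact fun h => hia h.1)]
      by_cases h2 : a ≤ i ∧ i < a + k
      · rw [if_pos h2, if_pos (by omega), pvGetD_set, if_neg (by exact fun h => by omega)]
      · rw [if_neg h2, if_neg (by omega)]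

lemma pvA_sim_length (dp : List Int) (c n : Nat) : (pvA_sim dp c n).length = dp.length :=
  pvFoldl_set_len _ _ dp

lemma pvA_sim_getD (dp : List Int) (c n : Nat) (hlen : n + 1 ≤ dp.length) (hc2 : c ≤ n) (i : Nat) :
    (pvA_sim dp c n).getD i 0
      = dp.getD i 0 + (if c ≤ i ∧ i ≤ n then dp.getD (i - c) 0 else 0) := by
  unfold pvA_sim
  rw [pvSimAux dp c (n + 1 - c) c dp rfl (by omega) i]
  by_cases h : c ≤ i ∧ i ≤ n
  · rw [if_pos (by omega), if_pos h]
  · rw [if_neg (by omega), if_neg h]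

lemma pvB_upd_length (dp : List Int) (c n : Nat) : (pvB_upd dp c n).length = dp.length :=
  pvFoldl_set_len _ _ dp

lemma pvB_upd_eq_sim (dp : List Int) (c n : Nat) (hc2 : c ≤ n) (hlen : n + 1 ≤ dp.length) :
    pvB_upd dp c n = pvA_sim dp c n := by
  apply List.ext_getElem (by rw [pvB_upd_length, pvA_sim_length])
  intro i h1 h2
  rw [← List.getD_eq_getElem _ 0 h1, ← List.getD_eq_getElem _ 0 h2]
  rw [pvA_sim_getD dp c n hlen hc2 i]
  unfold pvB_upd
  rw [pvSimBAux c (n + 1 - c) c dp (by omega) i]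
  by_cases h : c ≤ i ∧ i ≤ n
  · rw [if_pos (by omega), if_pos h]
  · rw [if_neg (by omega), if_neg h]

lemma pvA_loop_frozen (w : List Int) (n : Nat) :
    ∀ k c dp res, n + 1 - c = k → n + 1 ≤ dp.length →
      ∀ i, i < c → (pvA_loop w n c dp res).1.getD i 0 = dp.getD i 0 := by
  intro k
  induction k with
  | zero =>
    intro c dp res hk _ i _
    rw [pvA_loop, if_neg (by omega)]
  | succ k ih =>
    intro c dp res hk hlen i hic
    have hcn : c ≤ n := by omega
    rw [pvA_loop, if_pos hcn]
    simp only
    split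
    · exact ih (c+1) dp res (by omega) hlen i (by omega)
    · rw [ih (c+1) _ _ (by omega) (by rw [pvA_sim_length]; exact hlen) i (by omega)]
      rw [pvA_sim_getD dp c n hlen hcn i, if_neg (by omega)]
      ring

lemma pvAout_doomed (w : List Int) (n c : Nat) (dp res : List Int)
    (hlen : n + 1 ≤ dp.length) (i0 : Nat) (h1 : 1 ≤ i0) (h2 : i0 ≤ n) (h3 : i0 < c)
    (hne : dp.getD i0 0 ≠ w.getD (i0 - 1) 0) :
    pvAout w n c dp res = [] := by
  unfold pvAout
  rw [if_neg]
  simp only [List.all_eq_true, not_forall]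
  refine ⟨i0, List.mem_range'_1.2 ⟨h1, by omega⟩, ?_⟩
  simp only [decide_eq_true_eq]
  rw [pvA_loop_frozen w n (n + 1 - c) c dp res rfl hlen i0 h3]
  exact hne

lemma pvB_doomed (w : List Int) (n : Nat) :
    ∀ k c dp res, n + 1 - c = k → n + 1 ≤ dp.length → (∀ j, 0 ≤ dp.getD j 0) →
      (∃ i0, c ≤ i0 ∧ i0 ≤ n ∧ w.getD (i0 - 1) 0 < dp.getD i0 0) →
      pvB_loop w n c dp res = [] := by
  intro k
  induction k with
  | zero =>
    intro c dp res hk _ _ hex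
    obtain ⟨i0, hi1, hi2, _⟩ := hex
    omega
  | succ k ih =>
    intro c dp res hk hlen hpos hex
    obtain ⟨i0, hi1, hi2, hgt⟩ := hex
    have hcn : c ≤ n := by omega
    rw [pvB_loop, if_pos hcn]
    by_cases ht : dp.getD c 0 < w.getD (c - 1) 0
    · rw [if_pos ht]
      simp only
      have hi0c : i0 ≠ c := fun h => by rw [h] at hgt; omega
      have hupd : ∀ j, dp.getD j 0 ≤ (pvB_upd dp c n).getD j 0 := by
        intro j
        rw [pvB_upd_eq_sim dp c n hcn hlen, pvA_sim_getD dp c n hlen hcn j]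
        split
        · have := hpos (j - c); omega
        · omega
      split
      · rfl
      · apply ih (c+1) _ _ (by omega) (by rw [pvB_upd_length]; exact hlen)
        · intro j; have := hpos j; have := hupd j; omega
        · exact ⟨i0, by omega, hi2, lt_of_lt_of_le hgt (hupd i0)⟩
    · rw [if_neg ht]
      simp only
      by_cases hi0 : i0 = c
      · rw [if_pos (by rw [← hi0]; omega)]
      · split
        · rfl
        · exact ih (c+1) dp res (by omega) hlen hpos ⟨i0, by omega, hi2, hgt⟩

lemma pvMain (w : List Int) (n : Nat) :
    ∀ k c dp res, n + 1 - c = k → 1 ≤ c → n + 1 ≤ dp.length →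
      dp.getD 0 0 = 1 → (∀ j, 0 ≤ dp.getD j 0) →
      (∀ i, 1 ≤ i → i < c → dp.getD i 0 = w.getD (i - 1) 0) →
      pvAout w n c dp res = pvB_loop w n c dp res := by
  intro k
  induction k with
  | zero =>
    intro c dp res hk hc hlen h0 hpos hpre
    have hA : pvA_loop w n c dp res = (dp, res) := by
      rw [pvA_loop, if_neg (show ¬(c ≤ n) by omega)]
    have hb : pvB_loop w n c dp res = res := by
      rw [pvB_loop, if_neg (show ¬(c ≤ n) by omega)]
    unfold pvAout
    rw [hA, hb]
    simp only
    rw [if_pos]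
    simp only [List.all_eq_true, decide_eq_true_eq]
    intro i hi
    obtain ⟨h1, h2⟩ := List.mem_range'_1.1 hi
    exact hpre i h1 (by omega)
  | succ k ih =>
    intro c dp res hk hc hlen h0 hpos hpre
    have hcn : c ≤ n := by omega
    have hndD : ∀ i, (pvA_sim dp c n).getD i 0
        = dp.getD i 0 + (if c ≤ i ∧ i ≤ n then dp.getD (i - c) 0 else 0) :=
      fun i => pvA_sim_getD dp c n hlen hcn i
    have hndc : (pvA_sim dp c n).getD c 0 = dp.getD c 0 + 1 := by
      rw [hndD c, if_pos ⟨le_refl c, hcn⟩, Nat.sub_self, h0]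
    have hndlen : n + 1 ≤ (pvA_sim dp c n).length := by rw [pvA_sim_length]; exact hlen
    have hndpos : ∀ j, 0 ≤ (pvA_sim dp c n).getD j 0 := by
      intro j; rw [hndD j]
      split
      · have := hpos j; have := hpos (j - c); omega
      · have := hpos j; omega
    have hnd0 : (pvA_sim dp c n).getD 0 0 = 1 := by
      rw [hndD 0, if_neg (by omega), h0]; ring
    have hndlt : ∀ i, i < c → (pvA_sim dp c n).getD i 0 = dp.getD i 0 := by
      intro i h2; rw [hndD i, if_neg (by omega)]; ring
    have hupd : pvB_upd dp c n = pvA_sim dp c n := pvB_upd_eq_sim dp c n hcn hlen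
    by_cases hB : dp.getD c 0 < w.getD (c - 1) 0
    · -- B accepts coin c
      by_cases hex : ∃ i, 1 ≤ i ∧ i ≤ n ∧ w.getD (i - 1) 0 < (pvA_sim dp c n).getD i 0
      · -- A sees an exceed and rejects; both sides end in []
        have hexT : ((List.range' 1 n).any
            (fun i => decide ((pvA_sim dp c n).getD i 0 > w.getD (i - 1) 0))) = true := by
          obtain ⟨i, h1, h2, h3⟩ := hex
          rw [List.any_eq_true]
          exact ⟨i, List.mem_range'_1.2 ⟨h1, by omega⟩, by simpa using h3⟩
        have hA : pvAout w n c dp res = pvAout w n (c + 1) dp res := by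
          unfold pvAout
          rw [pvA_loop, if_pos hcn]
          simp only [hexT, if_true]
        have hAz : pvAout w n (c + 1) dp res = [] :=
          pvAout_doomed w n (c + 1) dp res hlen c hc hcn (by omega) (ne_of_lt hB)
        rw [hA, hAz, pvB_loop, if_pos hcn]
        simp only [if_pos hB]
        by_cases heq : (pvB_upd dp c n).getD c 0 = w.getD (c - 1) 0
        · rw [if_neg (fun h => h heq)]
          obtain ⟨i, h1, h2, h3⟩ := hex
          have hic : c + 1 ≤ i := by
            rcases Nat.lt_trichotomy i c with h | h | h
            · rw [hndlt i h, hpre i h1 h] at h3; omega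
            · subst h; rw [hupd] at heq; rw [heq] at h3; omega
            · omega
          exact (pvB_doomed w n (n + 1 - (c + 1)) (c + 1) (pvB_upd dp c n) (res ++ [(c : Int)])
            rfl (by rw [pvB_upd_length]; exact hlen) (by rw [hupd]; exact hndpos)
            ⟨i, hic, h2, by rw [hupd]; exact h3⟩).symm
        · rw [if_pos heq]
      · -- no exceed: A accepts too
        have hexF : ((List.range' 1 n).any
            (fun i => decide ((pvA_sim dp c n).getD i 0 > w.getD (i - 1) 0))) = false := by
          rw [List.any_eq_false]
          intro i him
          obtain ⟨h1, h2⟩ := List.mem_range'_1.1 him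
          simp only [decide_eq_true_eq, not_lt]
          by_contra hlt
          exact hex ⟨i, h1, by omega, by omega⟩
        have hA : pvAout w n c dp res = pvAout w n (c + 1) (pvA_sim dp c n) (res ++ [(c : Int)]) := by
          unfold pvAout
          rw [pvA_loop, if_pos hcn]
          simp only [hexF, Bool.false_eq_true, if_false]
        rw [hA, pvB_loop, if_pos hcn]
        simp only [if_pos hB, hupd]
        by_cases heq : (pvA_sim dp c n).getD c 0 = w.getD (c - 1) 0
        · rw [if_neg (fun h => h heq)]
          refine ih (c + 1) (pvA_sim dp c n) (res ++ [(c : Int)]) (by omega) (by omega)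
            hndlen hnd0 hndpos ?_
          intro i h1 h2
          rcases Nat.lt_or_ge i c with h | h
          · rw [hndlt i h]; exact hpre i h1 h
          · have : i = c := by omega
            rw [this]; exact heq
        · rw [if_pos heq]
          exact pvAout_doomed w n (c + 1) (pvA_sim dp c n) (res ++ [(c : Int)])
            hndlen c hc hcn (by omega) heq
    · -- B rejects coin c; A's simulated table exceeds at amount c, so A rejects too
      have hexT : ((List.range' 1 n).any
          (fun i => decide ((pvA_sim dp c n).getD i 0 > w.getD (i - 1) 0))) = true := by
        rw [List.any_eq_true]
        refine ⟨c, List.mem_range'_1.2 ⟨hc, by omega⟩, ?_⟩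
        simp only [decide_eq_true_eq, gt_iff_lt, hndc]
        omega
      have hA : pvAout w n c dp res = pvAout w n (c + 1) dp res := by
        unfold pvAout
        rw [pvA_loop, if_pos hcn]
        simp only [hexT, if_true]
      rw [hA, pvB_loop, if_pos hcn]
      simp only [if_neg hB]
      by_cases heq : dp.getD c 0 = w.getD (c - 1) 0
      · rw [if_neg (fun h => h heq)]
        refine ih (c + 1) dp res (by omega) (by omega) hlen h0 hpos ?_
        intro i h1 h2
        rcases Nat.lt_or_ge i c with h | h
        · exact hpre i h1 h
        · have : i = c := by omega
          rw [this]; exact heq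
      · rw [if_pos heq]
        exact pvAout_doomed w n (c + 1) dp res hlen c hc hcn (by omega) heq

-- ===== VERDICT (by name: the statement is the Claim_ definition above) =====
theorem findCoins_spec : Claim_equal_findCoins := by
  intro w _
  show findCoins w = findCoins_alt w
  show pvAout w w.length 1 ((List.replicate (w.length + 1) (0 : Int)).set 0 1) []
      = pvB_loop w w.length 1 ((List.replicate (w.length + 1) (0 : Int)).set 0 1) []
  refine pvMain w w.length (w.length + 1 - 1) 1 _ [] rfl (le_refl 1) ?_ ?_ ?_ ?_
  · simp
  · rw [pvGetD_set, if_pos ⟨rfl, by simp⟩]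
  · intro j
    rw [pvGetD_set]
    split
    · omega
    · rw [List.getD_eq_getElem?_getD, List.getElem?_replicate]
      split <;> simp
  · intro i h1 h2; omega
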